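-- pv_equiv track=rewrite | github.com/Krish01agrawal/smsFeatureComplete | sms/src/insights.py | _categorize_by_pattern
-- ===== SOURCE A (Python) =====
-- def _categorize_by_pattern(merchant: str, payment_method: str) -> str:
--     """Categorize payment method using data-driven pattern analysis."""
--     merchant_lower = merchant.lower()
--     payment_method_lower = payment_method.lower()
--
--     # Check for specific payment patterns
--     if any(keyword in merchant_lower for keyword in ['atm', 'cash', 'withdrawal']):
--         return 'ATM/Cash'
--
--     # Bank transfer indicators (NEFT, IMPS, RTGS)
--     if any(indicator in payment_method_lower for indicator in ['neft', 'imps', 'rtgs']):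
--         return 'Net Banking'
--
--     # Card payment indicators
--     if any(indicator in payment_method_lower for indicator in ['debit', 'credit', 'card']):
--         return 'Debit Card' if 'debit' in payment_method_lower else 'Credit Card'
--
--     # Check for wallet/digital payment patterns
--     wallet_patterns = ['wallet', 'balance', 'prepaid', 'digital']
--     if any(pattern in merchant_lower for pattern in wallet_patterns):
--         return 'Digital Wallet'
--
--     # Bank-to-bank transfers
--     if any(indicator in merchant_lower for indicator in ['transfer', 'fund transfer', 'bank']):
--         return 'Bank Transfer'
--
--     # Default for unrecognized patterns
--     return 'Other Payment Methods'
-- ===== SOURCE B (Python) =====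
-- def _categorize_by_pattern(merchant: str, payment_method: str) -> str:
--     """Categorize by scanning a flat keyword table and keeping the best-priority hit."""
--     m = merchant.lower()
--     p = payment_method.lower()
--     entries = [
--         (m, 'atm', 0, 'ATM/Cash'), (m, 'cash', 0, 'ATM/Cash'),
--         (m, 'withdrawal', 0, 'ATM/Cash'),
--         (p, 'neft', 1, 'Net Banking'), (p, 'imps', 1, 'Net Banking'),
--         (p, 'rtgs', 1, 'Net Banking'),
--         (p, 'debit', 2, 'Debit Card'),
--         (p, 'credit', 3, 'Credit Card'), (p, 'card', 3, 'Credit Card'),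
--         (m, 'wallet', 4, 'Digital Wallet'), (m, 'balance', 4, 'Digital Wallet'),
--         (m, 'prepaid', 4, 'Digital Wallet'), (m, 'digital', 4, 'Digital Wallet'),
--         (m, 'transfer', 5, 'Bank Transfer'), (m, 'fund transfer', 5, 'Bank Transfer'),
--         (m, 'bank', 5, 'Bank Transfer'),
--     ]
--     best = None
--     for target, keyword, priority, category in entries:
--         if keyword in target and (best is None or priority < best[0]):
--             best = (priority, category)
--     return 'Other Payment Methods' if best is None else best[1]
-- ===== Notes on version B (the rewrite author's own statement) =====
-- stated objective: alternative
-- what changed: Replaces A's early-return if-chain of any() checks by a single exhaustive scan over a flat (target, keyword, priority, category) table that keeps the minimum-priority match in an accumulator and returns its category at the end.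
import Mathlib
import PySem

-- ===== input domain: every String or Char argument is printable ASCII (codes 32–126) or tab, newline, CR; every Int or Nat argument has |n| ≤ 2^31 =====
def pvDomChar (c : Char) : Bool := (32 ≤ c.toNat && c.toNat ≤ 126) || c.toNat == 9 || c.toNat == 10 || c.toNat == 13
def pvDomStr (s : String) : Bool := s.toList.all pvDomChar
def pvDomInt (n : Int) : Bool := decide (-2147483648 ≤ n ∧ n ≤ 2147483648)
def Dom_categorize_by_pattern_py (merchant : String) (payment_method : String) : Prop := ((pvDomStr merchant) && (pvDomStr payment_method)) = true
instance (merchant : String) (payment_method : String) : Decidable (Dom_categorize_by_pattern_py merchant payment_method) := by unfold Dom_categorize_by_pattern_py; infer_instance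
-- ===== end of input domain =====

-- B replaces A's early-return if-chain by one exhaustive scan of a flat keyword table
-- keeping the best-priority hit in an accumulator (alternative decomposition; same cost).

-- ===== PORT A =====
def categorize_by_pattern_py (merchant : String) (payment_method : String) : String :=
  let merchant_lower := PySem.Str.lower merchant
  let payment_method_lower := PySem.Str.lower payment_method
  if ["atm", "cash", "withdrawal"].any (fun keyword => PySem.Str.isIn keyword merchant_lower) then
    "ATM/Cash"
  else if ["neft", "imps", "rtgs"].any (fun indicator => PySem.Str.isIn indicator payment_method_lower) then
    "Net Banking"
  else if ["debit", "credit", "card"].any (fun indicator => PySem.Str.isIn indicator payment_method_lower) then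
    (if PySem.Str.isIn "debit" payment_method_lower then "Debit Card" else "Credit Card")
  else if (["wallet", "balance", "prepaid", "digital"]).any (fun pattern => PySem.Str.isIn pattern merchant_lower) then
    "Digital Wallet"
  else if ["transfer", "fund transfer", "bank"].any (fun indicator => PySem.Str.isIn indicator merchant_lower) then
    "Bank Transfer"
  else
    "Other Payment Methods"

-- ===== PORT B =====
-- scan of Source B's for-loop: fold every table entry into the best-priority accumulator
def pvScan : List (String × String × Int × String) → Option (Int × String) → Option (Int × String)
  | [], best => best
  | (target, keyword, priority, category) :: rest, best =>
      pvScan rest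
        (if PySem.Str.isIn keyword target &&
            (match best with
             | none => true
             | some (bp, _) => decide (priority < bp)) then
          some (priority, category)
        else best)

def categorize_by_pattern_py_alt (merchant : String) (payment_method : String) : String :=
  let m := PySem.Str.lower merchant
  let p := PySem.Str.lower payment_method
  let entries : List (String × String × Int × String) :=
    [ (m, "atm", 0, "ATM/Cash"), (m, "cash", 0, "ATM/Cash"),
      (m, "withdrawal", 0, "ATM/Cash"),
      (p, "neft", 1, "Net Banking"), (p, "imps", 1, "Net Banking"),
      (p, "rtgs", 1, "Net Banking"),
      (p, "debit", 2, "Debit Card"),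
      (p, "credit", 3, "Credit Card"), (p, "card", 3, "Credit Card"),
      (m, "wallet", 4, "Digital Wallet"), (m, "balance", 4, "Digital Wallet"),
      (m, "prepaid", 4, "Digital Wallet"), (m, "digital", 4, "Digital Wallet"),
      (m, "transfer", 5, "Bank Transfer"), (m, "fund transfer", 5, "Bank Transfer"),
      (m, "bank", 5, "Bank Transfer") ]
  match pvScan entries none with
  | none => "Other Payment Methods"
  | some (_, category) => category

-- ===== PRECONDITION & SPEC =====
def Spec_categorize_by_pattern_py (merchant : String) (payment_method : String) (out : String) : Prop := out = categorize_by_pattern_py_alt merchant payment_method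
instance (merchant : String) (payment_method : String) (out : String) : Decidable (Spec_categorize_by_pattern_py merchant payment_method out) := by unfold Spec_categorize_by_pattern_py; infer_instance

-- ===== CLAIM (what is proved, stated in full; the proofs are below) =====
def Claim_equal_categorize_by_pattern_py : Prop := ∀ (merchant : String) (payment_method : String), Dom_categorize_by_pattern_py merchant payment_method → Spec_categorize_by_pattern_py merchant payment_method (categorize_by_pattern_py merchant payment_method)

-- ===== LEMMAS AND PROOFS =====
theorem pvScan_append (l1 l2 : List (String × String × Int × String)) (b : Option (Int × String)) :
    pvScan (l1 ++ l2) b = pvScan l2 (pvScan l1 b) := by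
  induction l1 generalizing b with
  | nil => rfl
  | cons e t ih => obtain ⟨tg, kw, pri, cat⟩ := e; simp [pvScan, ih]

theorem pvScan_stays (l : List (String × String × Int × String)) (bp : Int) (c : String)
    (h : ∀ e ∈ l, bp ≤ e.2.2.1) : pvScan l (some (bp, c)) = some (bp, c) := by
  induction l with
  | nil => rfl
  | cons e t ih =>
    obtain ⟨tg, kw, pri, cat⟩ := e
    have h1 : bp ≤ pri := h _ List.mem_cons_self
    have hd : decide (pri < bp) = false := by simp; omega
    simp only [pvScan, hd, Bool.and_false, Bool.false_eq_true, if_neg (not_false)]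
    exact ih (fun e he => h e (List.mem_cons_of_mem _ he))

theorem pvScan_block (l : List (String × String × Int × String)) (q : Int) (c : String)
    (h : ∀ e ∈ l, e.2.2.1 = q ∧ e.2.2.2 = c) :
    pvScan l none = if l.any (fun e => PySem.Str.isIn e.2.1 e.1) then some (q, c) else none := by
  induction l with
  | nil => simp [pvScan]
  | cons e t ih =>
    obtain ⟨tg, kw, pri, cat⟩ := e
    obtain ⟨hq, hc⟩ := h _ List.mem_cons_self
    simp only at hq hc
    subst hq; subst hc
    by_cases hm : PySem.Str.isIn kw tg = true
    · simp only [pvScan, hm, Bool.true_and, List.any_cons, Bool.true_or, if_true]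
      exact pvScan_stays t pri cat (fun e he => le_of_eq ((h e (List.mem_cons_of_mem _ he)).1).symm)
    · have hm' : PySem.Str.isIn kw tg = false := by revert hm; cases PySem.Str.isIn kw tg <;> simp
      simp only [pvScan, hm', Bool.false_and, List.any_cons, Bool.false_or,
        Bool.false_eq_true, if_neg (not_false)]
      exact ih (fun e he => h e (List.mem_cons_of_mem _ he))

theorem pvNeTrue {b : Bool} (h : b = false) : ¬ b = true := by simp [h]

-- ===== VERDICT (by name: the statement is the Claim_ definition above) =====
theorem categorize_by_pattern_py_spec : Claim_equal_categorize_by_pattern_py := by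
  intro merchant payment_method _
  unfold Spec_categorize_by_pattern_py categorize_by_pattern_py categorize_by_pattern_py_alt
  set m := PySem.Str.lower merchant with hm
  set p := PySem.Str.lower payment_method with hp
  dsimp only
  rw [show ([ (m, "atm", (0:Int), "ATM/Cash"), (m, "cash", 0, "ATM/Cash"), (m, "withdrawal", 0, "ATM/Cash"), (p, "neft", (1:Int), "Net Banking"), (p, "imps", 1, "Net Banking"), (p, "rtgs", 1, "Net Banking"), (p, "debit", (2:Int), "Debit Card"), (p, "credit", (3:Int), "Credit Card"), (p, "card", 3, "Credit Card"), (m, "wallet", (4:Int), "Digital Wallet"), (m, "balance", 4, "Digital Wallet"), (m, "prepaid", 4, "Digital Wallet"), (m, "digital", 4, "Digital Wallet"), (m, "transfer", (5:Int), "Bank Transfer"), (m, "fund transfer", 5, "Bank Transfer"), (m, "bank", 5, "Bank Transfer") ] : List (String × String × Int × String)) = [ (m, "atm", (0:Int), "ATM/Cash"), (m, "cash", 0, "ATM/Cash"), (m, "withdrawal", 0, "ATM/Cash") ] ++ [ (p, "neft", (1:Int), "Net Banking"), (p, "imps", 1, "Net Banking"), (p, "rtgs", 1, "Net Banking") ]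 ++ [ (p, "debit", (2:Int), "Debit Card") ] ++ [ (p, "credit", (3:Int), "Credit Card"), (p, "card", 3, "Credit Card") ] ++ [ (m, "wallet", (4:Int), "Digital Wallet"), (m, "balance", 4, "Digital Wallet"), (m, "prepaid", 4, "Digital Wallet"), (m, "digital", 4, "Digital Wallet") ] ++ [ (m, "transfer", (5:Int), "Bank Transfer"), (m, "fund transfer", 5, "Bank Transfer"), (m, "bank", 5, "Bank Transfer") ] from by simp, pvScan_append, pvScan_append, pvScan_append, pvScan_append, pvScan_append]
  rw [pvScan_block [ (m, "atm", (0:Int), "ATM/Cash"), (m, "cash", 0, "ATM/Cash"), (m, "withdrawal", 0, "ATM/Cash") ] 0 "ATM/Cash" (by intro e he; fin_cases he <;> exact ⟨rfl, rfl⟩)]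
  by_cases h1 : PySem.Str.isIn "atm" m = true ∨ PySem.Str.isIn "cash" m = true ∨ PySem.Str.isIn "withdrawal" m = true
  · have hB1 : ([ (m, "atm", (0:Int), "ATM/Cash"), (m, "cash", 0, "ATM/Cash"), (m, "withdrawal", 0, "ATM/Cash") ].any (fun e => PySem.Str.isIn e.2.1 e.1)) = true := by simp only [List.any_cons, List.any_nil, Bool.or_false, Bool.or_eq_true]; exact h1
    have hA1 : (["atm", "cash", "withdrawal"].any (fun keyword => PySem.Str.isIn keyword m)) = true := by simp only [List.any_cons, List.any_nil, Bool.or_false, Bool.or_eq_true]; exact h1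
    rw [if_pos hA1, if_pos hB1]
    rw [pvScan_stays [ (p, "neft", (1:Int), "Net Banking"), (p, "imps", 1, "Net Banking"), (p, "rtgs", 1, "Net Banking") ] 0 "ATM/Cash" (by intro e he; fin_cases he <;> norm_num)]
    rw [pvScan_stays [ (p, "debit", (2:Int), "Debit Card") ] 0 "ATM/Cash" (by intro e he; fin_cases he <;> norm_num)]
    rw [pvScan_stays [ (p, "credit", (3:Int), "Credit Card"), (p, "card", 3, "Credit Card") ] 0 "ATM/Cash" (by intro e he; fin_cases he <;> norm_num)]
    rw [pvScan_stays [ (m, "wallet", (4:Int), "Digital Wallet"), (m, "balance", 4, "Digital Wallet"), (m, "prepaid", 4, "Digital Wallet"), (m, "digital", 4, "Digital Wallet") ] 0 "ATM/Cash" (by intro e he; fin_cases he <;> norm_num)]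
    rw [pvScan_stays [ (m, "transfer", (5:Int), "Bank Transfer"), (m, "fund transfer", 5, "Bank Transfer"), (m, "bank", 5, "Bank Transfer") ] 0 "ATM/Cash" (by intro e he; fin_cases he <;> norm_num)]
  · have hB1 : ([ (m, "atm", (0:Int), "ATM/Cash"), (m, "cash", 0, "ATM/Cash"), (m, "withdrawal", 0, "ATM/Cash") ].any (fun e => PySem.Str.isIn e.2.1 e.1)) = false := by rw [Bool.eq_false_iff]; simp only [ne_eq, List.any_cons, List.any_nil, Bool.or_false, Bool.or_eq_true]; exact h1
    have hA1 : (["atm", "cash", "withdrawal"].any (fun keyword => PySem.Str.isIn keyword m)) = false := by rw [Bool.eq_false_iff]; simp only [ne_eq, List.any_cons, List.any_nil, Bool.or_false, Bool.or_eq_true]; exact h1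
    rw [if_neg (pvNeTrue hA1), if_neg (pvNeTrue hB1)]
    rw [pvScan_block [ (p, "neft", (1:Int), "Net Banking"), (p, "imps", 1, "Net Banking"), (p, "rtgs", 1, "Net Banking") ] 1 "Net Banking" (by intro e he; fin_cases he <;> exact ⟨rfl, rfl⟩)]
    by_cases h2 : PySem.Str.isIn "neft" p = true ∨ PySem.Str.isIn "imps" p = true ∨ PySem.Str.isIn "rtgs" p = true
    · have hB2 : ([ (p, "neft", (1:Int), "Net Banking"), (p, "imps", 1, "Net Banking"), (p, "rtgs", 1, "Net Banking") ].any (fun e => PySem.Str.isIn e.2.1 e.1)) = true := by simp only [List.any_cons, List.any_nil, Bool.or_false, Bool.or_eq_true]; exact h2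
      have hA2 : (["neft", "imps", "rtgs"].any (fun indicator => PySem.Str.isIn indicator p)) = true := by simp only [List.any_cons, List.any_nil, Bool.or_false, Bool.or_eq_true]; exact h2
      rw [if_pos hA2, if_pos hB2]
      rw [pvScan_stays [ (p, "debit", (2:Int), "Debit Card") ] 1 "Net Banking" (by intro e he; fin_cases he <;> norm_num)]
      rw [pvScan_stays [ (p, "credit", (3:Int), "Credit Card"), (p, "card", 3, "Credit Card") ] 1 "Net Banking" (by intro e he; fin_cases he <;> norm_num)]
      rw [pvScan_stays [ (m, "wallet", (4:Int), "Digital Wallet"), (m, "balance", 4, "Digital Wallet"), (m, "prepaid", 4, "Digital Wallet"), (m, "digital", 4, "Digital Wallet") ] 1 "Net Banking" (by intro e he; fin_cases he <;> norm_num)]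
      rw [pvScan_stays [ (m, "transfer", (5:Int), "Bank Transfer"), (m, "fund transfer", 5, "Bank Transfer"), (m, "bank", 5, "Bank Transfer") ] 1 "Net Banking" (by intro e he; fin_cases he <;> norm_num)]
    · have hB2 : ([ (p, "neft", (1:Int), "Net Banking"), (p, "imps", 1, "Net Banking"), (p, "rtgs", 1, "Net Banking") ].any (fun e => PySem.Str.isIn e.2.1 e.1)) = false := by rw [Bool.eq_false_iff]; simp only [ne_eq, List.any_cons, List.any_nil, Bool.or_false, Bool.or_eq_true]; exact h2
      have hA2 : (["neft", "imps", "rtgs"].any (fun indicator => PySem.Str.isIn indicator p)) = false := by rw [Bool.eq_false_iff]; simp only [ne_eq, List.any_cons, List.any_nil, Bool.or_false, Bool.or_eq_true]; exact h2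
      rw [if_neg (pvNeTrue hA2), if_neg (pvNeTrue hB2)]
      rw [pvScan_block [ (p, "debit", (2:Int), "Debit Card") ] 2 "Debit Card" (by intro e he; fin_cases he <;> exact ⟨rfl, rfl⟩)]
      by_cases h3 : PySem.Str.isIn "debit" p = true
      · have hB3 : ([ (p, "debit", (2:Int), "Debit Card") ].any (fun e => PySem.Str.isIn e.2.1 e.1)) = true := by simp only [List.any_cons, List.any_nil, Bool.or_false, Bool.or_eq_true]; exact h3
        have hA3 : (["debit", "credit", "card"].any (fun indicator => PySem.Str.isIn indicator p)) = true := by simp only [List.any_cons, List.any_nil, Bool.or_false, Bool.or_eq_true]; exact Or.inl h3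
        rw [if_pos hA3, if_pos h3, if_pos hB3]
        rw [pvScan_stays [ (p, "credit", (3:Int), "Credit Card"), (p, "card", 3, "Credit Card") ] 2 "Debit Card" (by intro e he; fin_cases he <;> norm_num)]
        rw [pvScan_stays [ (m, "wallet", (4:Int), "Digital Wallet"), (m, "balance", 4, "Digital Wallet"), (m, "prepaid", 4, "Digital Wallet"), (m, "digital", 4, "Digital Wallet") ] 2 "Debit Card" (by intro e he; fin_cases he <;> norm_num)]
        rw [pvScan_stays [ (m, "transfer", (5:Int), "Bank Transfer"), (m, "fund transfer", 5, "Bank Transfer"), (m, "bank", 5, "Bank Transfer") ] 2 "Debit Card" (by intro e he; fin_cases he <;> norm_num)]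
      · have hB3 : ([ (p, "debit", (2:Int), "Debit Card") ].any (fun e => PySem.Str.isIn e.2.1 e.1)) = false := by rw [Bool.eq_false_iff]; simp only [ne_eq, List.any_cons, List.any_nil, Bool.or_false, Bool.or_eq_true]; exact h3
        rw [if_neg (pvNeTrue hB3)]
        rw [pvScan_block [ (p, "credit", (3:Int), "Credit Card"), (p, "card", 3, "Credit Card") ] 3 "Credit Card" (by intro e he; fin_cases he <;> exact ⟨rfl, rfl⟩)]
        by_cases h4 : PySem.Str.isIn "credit" p = true ∨ PySem.Str.isIn "card" p = true
        · have hB4 : ([ (p, "credit", (3:Int), "Credit Card"), (p, "card", 3, "Credit Card") ].any (fun e => PySem.Str.isIn e.2.1 e.1)) = true := by simp only [List.any_cons, List.any_nil, Bool.or_false, Bool.or_eq_true]; exact h4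
          have hA4 : (["debit", "credit", "card"].any (fun indicator => PySem.Str.isIn indicator p)) = true := by simp only [List.any_cons, List.any_nil, Bool.or_false, Bool.or_eq_true]; exact Or.inr h4
          have h3f : PySem.Str.isIn "debit" p = false := by revert h3; cases PySem.Str.isIn "debit" p <;> simp
          rw [if_pos hA4, if_neg (pvNeTrue h3f), if_pos hB4]
          rw [pvScan_stays [ (m, "wallet", (4:Int), "Digital Wallet"), (m, "balance", 4, "Digital Wallet"), (m, "prepaid", 4, "Digital Wallet"), (m, "digital", 4, "Digital Wallet") ] 3 "Credit Card" (by intro e he; fin_cases he <;> norm_num)]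
          rw [pvScan_stays [ (m, "transfer", (5:Int), "Bank Transfer"), (m, "fund transfer", 5, "Bank Transfer"), (m, "bank", 5, "Bank Transfer") ] 3 "Credit Card" (by intro e he; fin_cases he <;> norm_num)]
        · have hB4 : ([ (p, "credit", (3:Int), "Credit Card"), (p, "card", 3, "Credit Card") ].any (fun e => PySem.Str.isIn e.2.1 e.1)) = false := by rw [Bool.eq_false_iff]; simp only [ne_eq, List.any_cons, List.any_nil, Bool.or_false, Bool.or_eq_true]; exact h4
          have hA4 : (["debit", "credit", "card"].any (fun indicator => PySem.Str.isIn indicator p)) = false := by rw [Bool.eq_false_iff]; simp only [ne_eq, List.any_cons, List.any_nil, Bool.or_false, Bool.or_eq_true]; exact fun hx => hx.elim h3 h4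
          rw [if_neg (pvNeTrue hA4), if_neg (pvNeTrue hB4)]
          rw [pvScan_block [ (m, "wallet", (4:Int), "Digital Wallet"), (m, "balance", 4, "Digital Wallet"), (m, "prepaid", 4, "Digital Wallet"), (m, "digital", 4, "Digital Wallet") ] 4 "Digital Wallet" (by intro e he; fin_cases he <;> exact ⟨rfl, rfl⟩)]
          by_cases h5 : PySem.Str.isIn "wallet" m = true ∨ PySem.Str.isIn "balance" m = true ∨ PySem.Str.isIn "prepaid" m = true ∨ PySem.Str.isIn "digital" m = true
          · have hB5 : ([ (m, "wallet", (4:Int), "Digital Wallet"), (m, "balance", 4, "Digital Wallet"), (m, "prepaid", 4, "Digital Wallet"), (m, "digital", 4, "Digital Wallet") ].any (fun e => PySem.Str.isIn e.2.1 e.1)) = true := by simp only [List.any_cons, List.any_nil, Bool.or_false, Bool.or_eq_true]; exact h5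
            have hA5 : (["wallet", "balance", "prepaid", "digital"].any (fun pattern => PySem.Str.isIn pattern m)) = true := by simp only [List.any_cons, List.any_nil, Bool.or_false, Bool.or_eq_true]; exact h5
            rw [if_pos hA5, if_pos hB5]
            rw [pvScan_stays [ (m, "transfer", (5:Int), "Bank Transfer"), (m, "fund transfer", 5, "Bank Transfer"), (m, "bank", 5, "Bank Transfer") ] 4 "Digital Wallet" (by intro e he; fin_cases he <;> norm_num)]
          · have hB5 : ([ (m, "wallet", (4:Int), "Digital Wallet"), (m, "balance", 4, "Digital Wallet"), (m, "prepaid", 4, "Digital Wallet"), (m, "digital", 4, "Digital Wallet") ].any (fun e => PySem.Str.isIn e.2.1 e.1)) = false := by rw [Bool.eq_false_iff]; simp only [ne_eq, List.any_cons, List.any_nil, Bool.or_false, Bool.or_eq_true]; exact h5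
            have hA5 : (["wallet", "balance", "prepaid", "digital"].any (fun pattern => PySem.Str.isIn pattern m)) = false := by rw [Bool.eq_false_iff]; simp only [ne_eq, List.any_cons, List.any_nil, Bool.or_false, Bool.or_eq_true]; exact h5
            rw [if_neg (pvNeTrue hA5), if_neg (pvNeTrue hB5)]
            rw [pvScan_block [ (m, "transfer", (5:Int), "Bank Transfer"), (m, "fund transfer", 5, "Bank Transfer"), (m, "bank", 5, "Bank Transfer") ] 5 "Bank Transfer" (by intro e he; fin_cases he <;> exact ⟨rfl, rfl⟩)]
            by_cases h6 : PySem.Str.isIn "transfer" m = true ∨ PySem.Str.isIn "fund transfer" m = true ∨ PySem.Str.isIn "bank" m = true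
            · have hB6 : ([ (m, "transfer", (5:Int), "Bank Transfer"), (m, "fund transfer", 5, "Bank Transfer"), (m, "bank", 5, "Bank Transfer") ].any (fun e => PySem.Str.isIn e.2.1 e.1)) = true := by simp only [List.any_cons, List.any_nil, Bool.or_false, Bool.or_eq_true]; exact h6
              have hA6 : (["transfer", "fund transfer", "bank"].any (fun indicator => PySem.Str.isIn indicator m)) = true := by simp only [List.any_cons, List.any_nil, Bool.or_false, Bool.or_eq_true]; exact h6
              rw [if_pos hA6, if_pos hB6]
            · have hB6 : ([ (m, "transfer", (5:Int), "Bank Transfer"), (m, "fund transfer", 5, "Bank Transfer"), (m, "bank", 5, "Bank Transfer") ].any (fun e => PySem.Str.isIn e.2.1 e.1)) = false := by rw [Bool.eq_false_iff]; simp only [ne_eq, List.any_cons, List.any_nil, Bool.or_false, Bool.or_eq_true]; exact h6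
              have hA6 : (["transfer", "fund transfer", "bank"].any (fun indicator => PySem.Str.isIn indicator m)) = false := by rw [Bool.eq_false_iff]; simp only [ne_eq, List.any_cons, List.any_nil, Bool.or_false, Bool.or_eq_true]; exact h6
              rw [if_neg (pvNeTrue hA6), if_neg (pvNeTrue hB6)]
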